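-- pv_equiv track=rewrite | github.com/filokloi/AIchain | aichaind/routing/control_intent.py | _strip_after_first_separator
-- ===== SOURCE A (Python) =====
-- def _strip_after_first_separator(text: str, hints: dict[str, tuple[str, ...]]) -> str:
--     lowered = (text or "").lower()
--     match_index = -1
--     match_token = ""
--     for token in hints["control_only_separators"]:
--         idx = lowered.find(token)
--         if idx != -1 and (match_index == -1 or idx < match_index):
--             match_index = idx
--             match_token = token
--     if match_index == -1:
--         return ""
--     remainder = text[match_index + len(match_token):].strip(" ,.;:-")
--     return remainder
-- ===== SOURCE B (Python) =====
-- def _strip_after_first_separator(text: str, hints: dict[str, tuple[str, ...]]) -> str: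
--     lowered = (text or "").lower()
--     tokens = hints["control_only_separators"]
--     for i in range(len(lowered) + 1):
--         for token in tokens:
--             if lowered.startswith(token, i):
--                 return text[i + len(token):].strip(" ,.;:-")
--     return ""
-- ===== Notes on version B (the rewrite author's own statement) =====
-- stated objective: alternative
-- what changed: B replaces A's token-outer loop (one full find() scan per token plus a running minimum index and token) by a single position-outer left-to-right scan that at each text position tries the tokens in order and returns at the first match, so no running minimum or per-token full scan remains.
import Mathlib
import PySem

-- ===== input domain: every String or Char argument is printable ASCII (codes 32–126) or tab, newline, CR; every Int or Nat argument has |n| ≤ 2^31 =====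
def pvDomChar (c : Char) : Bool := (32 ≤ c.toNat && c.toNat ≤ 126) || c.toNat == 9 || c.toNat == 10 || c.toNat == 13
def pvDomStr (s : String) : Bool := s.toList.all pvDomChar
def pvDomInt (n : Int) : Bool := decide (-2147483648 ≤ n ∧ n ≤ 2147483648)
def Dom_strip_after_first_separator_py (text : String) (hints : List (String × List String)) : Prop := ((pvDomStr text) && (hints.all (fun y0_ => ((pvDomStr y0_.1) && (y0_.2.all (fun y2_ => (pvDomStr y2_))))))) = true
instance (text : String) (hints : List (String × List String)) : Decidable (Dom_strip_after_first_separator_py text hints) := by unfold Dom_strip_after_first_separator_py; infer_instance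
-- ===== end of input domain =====

-- B replaces A's token-outer find()+running-minimum loop by one position-outer left-to-right scan; objective: alternative (same asymptotic cost).

-- hints["control_only_separators"]: first matching key in the association list (a missing key = Python KeyError, excluded by Pre_, so the .getD [] default is never reached inside Pre_)
def pvTokens (hints : List (String × List String)) : List String :=
  ((hints.find? (fun p => p.1 == "control_only_separators")).map (·.2)).getD []

-- A's loop body, named (one iteration of 'for token in …')
def pvStep (lowered : String) (s : Int × String) (token : String) : Int × String :=
  let idx := PySem.Str.find lowered token
  if idx ≠ -1 ∧ (s.1 = -1 ∨ idx < s.1) then (idx, token) else s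

-- ===== PORT A =====
def strip_after_first_separator_py (text : String) (hints : List (String × List String)) : String :=
  let lowered := PySem.Str.lower text
  let st := (pvTokens hints).foldl (pvStep lowered) (-1, "")
  if st.1 = -1 then ""
  else PySem.Str.stripChars (PySem.Str.slice text (some (st.1 + PySem.Str.len st.2)) none) " ,.;:-"

-- ===== PORT B =====
-- Python's lowered.startswith(token, i) for 0 ≤ i ≤ len(lowered) is exactly startswith on the slice lowered[i:] (exact on that range).
-- the 'for i in range(len(lowered)+1)' loop with early return, as countdown recursion on the remaining fuel
def pvScan (text : String) (lowered : String) (tokens : List String) : Nat → Nat → String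
  | _, 0 => ""
  | i, fuel+1 =>
    match tokens.find? (fun t => PySem.Str.startswith (PySem.Str.slice lowered (some (i : Int)) none) t) with
    | some t => PySem.Str.stripChars (PySem.Str.slice text (some ((i : Int) + PySem.Str.len t)) none) " ,.;:-"
    | none => pvScan text lowered tokens (i+1) fuel

def strip_after_first_separator_py_alt (text : String) (hints : List (String × List String)) : String :=
  let lowered := PySem.Str.lower text
  pvScan text lowered (pvTokens hints) 0 (lowered.toList.length + 1)

-- ===== PRECONDITION & SPEC =====
-- Pre_ excludes exactly the inputs where hints has no "control_only_separators" key: Python A raises KeyError there (so does B).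
def Pre_strip_after_first_separator_py (text : String) (hints : List (String × List String)) : Prop :=
  (hints.find? (fun p => p.1 == "control_only_separators")).isSome
instance (text : String) (hints : List (String × List String)) : Decidable (Pre_strip_after_first_separator_py text hints) := by unfold Pre_strip_after_first_separator_py; infer_instance
def pvWitness_strip_after_first_separator_py : String × (List (String × List String)) :=
  ("Reply only, please: hello", [("control_only_separators", ["reply only", "only:"])])

def Spec_strip_after_first_separator_py (text : String) (hints : List (String × List String)) (out : String) : Prop := out = strip_after_first_separator_py_alt text hints
instance (text : String) (hints : List (String × List String)) (out : String) : Decidable (Spec_strip_after_first_separator_py text hints out) := by unfold Spec_strip_after_first_separator_py; infer_instance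

-- ===== CLAIM (what is proved, stated in full; the proofs are below) =====
def Claim_equal_strip_after_first_separator_py : Prop := ∀ (text : String) (hints : List (String × List String)), Dom_strip_after_first_separator_py text hints → Pre_strip_after_first_separator_py text hints → Spec_strip_after_first_separator_py text hints (strip_after_first_separator_py text hints)

-- ===== LEMMAS AND PROOFS =====

-- token t occurs (lower-cased) starting at position i
def pvQ (L : List Char) (i : Nat) (t : String) : Bool := PySem.Chars.startswith (L.drop i) t.toList

theorem pvQ_iff (L : List Char) (i : Nat) (t : String) : pvQ L i t = true ↔ t.toList <+: L.drop i := by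
  simp [pvQ, PySem.Chars.startswith_iff]

-- if t occurs at j then find points no later than j
theorem pvFind_le_of_prefix (L : List Char) (t : String) (j : Nat) (h : t.toList <+: L.drop j) :
    PySem.Chars.find L t.toList ≤ (j : Int) ∧ PySem.Chars.find L t.toList ≠ -1 := by
  have hinf : t.toList <:+: L := by
    rw [← PySem.Chars.isIn_iff_infix, ← PySem.Chars.exists_prefix_drop_iff_isIn]
    exact ⟨j, h⟩
  have hne : PySem.Chars.find L t.toList ≠ -1 := (PySem.Chars.find_ne_neg_one_iff L t.toList).mpr hinf
  have hnn : 0 ≤ PySem.Chars.find L t.toList := (PySem.Chars.find_nonneg_iff L t.toList).mpr hinf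
  have hspec := PySem.Chars.find_spec hnn
  refine ⟨?_, hne⟩
  by_contra hlt
  push Not at hlt
  have : j < (PySem.Chars.find L t.toList).toNat := by omega
  exact hspec.2 j this h

-- loop invariant for A's fold
def pvInv (L : List Char) (done : List String) (s : Int × String) : Prop :=
  (s = (-1, "") ∧ ∀ t ∈ done, PySem.Chars.find L t.toList = -1) ∨
  (0 ≤ s.1 ∧ PySem.Chars.find L s.2.toList = s.1 ∧
   ∃ pre post, done = pre ++ s.2 :: post ∧
     (∀ t ∈ pre, PySem.Chars.find L t.toList = -1 ∨ s.1 < PySem.Chars.find L t.toList) ∧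
     (∀ t ∈ post, PySem.Chars.find L t.toList = -1 ∨ s.1 ≤ PySem.Chars.find L t.toList))

theorem pvStep_inv (lowered : String) (done : List String) (s : Int × String) (t : String)
    (h : pvInv lowered.toList done s) : pvInv lowered.toList (done ++ [t]) (pvStep lowered s t) := by
  have hfind : PySem.Str.find lowered t = PySem.Chars.find lowered.toList t.toList := by
    simp
  unfold pvStep
  set f := PySem.Chars.find lowered.toList t.toList with hf
  rw [hfind]
  by_cases hc : f ≠ -1 ∧ (s.1 = -1 ∨ f < s.1)
  · simp only [if_pos hc]
    right
    have hnn : 0 ≤ f := by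
      have := PySem.Chars.neg_one_le_find lowered.toList t.toList
      omega
    refine ⟨hnn, rfl, done, [], by simp, ?_, by simp⟩
    intro u hu
    rcases h with ⟨hs, hall⟩ | ⟨hpos, hfw, pre, post, hdec, hpre, hpost⟩
    · exact Or.inl (hall u hu)
    · rcases hc.2 with hs1 | hlt
      · omega
      rw [hdec] at hu
      rcases List.mem_append.mp hu with hu | hu
      · rcases hpre u hu with h1 | h1
        · exact Or.inl h1
        · exact Or.inr (by omega)
      · rcases List.mem_cons.mp hu with rfl | hu
        · exact Or.inr (by omega)
        · rcases hpost u hu with h1 | h1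
          · exact Or.inl h1
          · exact Or.inr (by omega)
  · simp only [if_neg hc]
    rcases h with ⟨hs, hall⟩ | ⟨hpos, hfw, pre, post, hdec, hpre, hpost⟩
    · left
      refine ⟨hs, ?_⟩
      intro u hu
      rcases List.mem_append.mp hu with hu | hu
      · exact hall u hu
      · rcases List.mem_cons.mp hu with rfl | hu
        · -- condition failed while s.1 = -1, so f = -1
          by_contra hne
          exact hc ⟨hne, Or.inl (by rw [hs])⟩
        · simp at hu
    · right
      refine ⟨hpos, hfw, pre, post ++ [t], by rw [hdec]; simp, hpre, ?_⟩
      intro u hu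
      rcases List.mem_append.mp hu with hu | hu
      · exact hpost u hu
      · rcases List.mem_cons.mp hu with rfl | hu
        · by_cases hfe : f = -1
          · exact Or.inl hfe
          · right
            by_contra hlt
            exact hc ⟨hfe, Or.inr (by omega)⟩
        · simp at hu
      
theorem pvInv_foldl (lowered : String) (rest : List String) :
    ∀ (done : List String) (s : Int × String), pvInv lowered.toList done s →
      pvInv lowered.toList (done ++ rest) (rest.foldl (pvStep lowered) s) := by
  induction rest with
  | nil => intro done s h; simpa using h
  | cons t rest ih =>
    intro done s h
    have h1 := pvStep_inv lowered done s t h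
    have h2 := ih (done ++ [t]) (pvStep lowered s t) h1
    simpa using h2

-- B's scan returns "" when no token matches at any scanned position
theorem pvScan_none (text lowered : String) (ts : List String) :
    ∀ (fuel i : Nat), (∀ j, ∀ t ∈ ts, pvQ lowered.toList j t = false) →
      pvScan text lowered ts i fuel = "" := by
  intro fuel
  induction fuel with
  | zero => intro i h; rfl
  | succ fuel ih =>
    intro i h
    have hpred : (fun t => PySem.Str.startswith (PySem.Str.slice lowered (some (i : Int)) none) t) = pvQ lowered.toList i := by
      funext t
      simp [pvQ, PySem.Chars.startswith, PySem.List.slice_from_natCast]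
    rw [pvScan, hpred]
    rw [List.find?_eq_none.mpr (fun t ht => by simp [h i t ht])]
    exact ih (i+1) h

-- B's scan returns the result at the first matching position
theorem pvScan_hit (text lowered : String) (ts : List String) (m : Nat) (t0 : String)
    (hfind : ts.find? (pvQ lowered.toList m) = some t0)
    (hnone : ∀ j < m, ∀ t ∈ ts, pvQ lowered.toList j t = false) :
    ∀ (fuel i : Nat), i ≤ m → m < i + fuel →
      pvScan text lowered ts i fuel =
        PySem.Str.stripChars (PySem.Str.slice text (some ((m : Int) + PySem.Str.len t0)) none) " ,.;:-" := by
  intro fuel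
  induction fuel with
  | zero => intro i h1 h2; omega
  | succ fuel ih =>
    intro i h1 h2
    have hpred : (fun t => PySem.Str.startswith (PySem.Str.slice lowered (some (i : Int)) none) t) = pvQ lowered.toList i := by
      funext t
      simp [pvQ, PySem.Chars.startswith, PySem.List.slice_from_natCast]
    rw [pvScan, hpred]
    by_cases hi : i = m
    · subst hi
      rw [hfind]
    · have hlt : i < m := by omega
      rw [List.find?_eq_none.mpr (fun t ht => by simp [hnone i hlt t ht])]
      exact ih (i+1) (by omega) (by omega)

-- ===== VERDICT (by name: the statement is the Claim_ definition above) =====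
theorem strip_after_first_separator_py_spec : Claim_equal_strip_after_first_separator_py := by
  intro text hints _ _
  unfold Spec_strip_after_first_separator_py
  unfold strip_after_first_separator_py strip_after_first_separator_py_alt
  simp only []
  set lowered := PySem.Str.lower text with hlow
  set ts := pvTokens hints with hts
  set L := lowered.toList with hL
  have hinv : pvInv L ts (ts.foldl (pvStep lowered) (-1, "")) := by
    have := pvInv_foldl lowered ts [] (-1, "") (Or.inl ⟨rfl, by simp⟩)
    simpa using this
  set st := ts.foldl (pvStep lowered) (-1, "") with hst
  by_cases hmi : st.1 = -1
  · rw [if_pos hmi]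
    rcases hinv with ⟨hs, hall⟩ | ⟨hpos, _⟩
    · symm
      apply pvScan_none
      intro j t ht
      by_contra hq
      have hq' : pvQ L j t = true := by
        cases h : pvQ L j t
        · exact absurd h hq
        · rfl
      have := pvFind_le_of_prefix L t j ((pvQ_iff L j t).mp hq')
      exact this.2 (hall t ht)
    · omega
  · rw [if_neg hmi]
    rcases hinv with ⟨hs, _⟩ | ⟨hpos, hfw, pre, post, hdec, hpre, hpost⟩
    · exact absurd (by rw [hs]) hmi
    set m := st.1.toNat with hm
    have hm1 : st.1 = (m : Int) := by omega
    -- every token's find is -1 or ≥ st.1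
    have hall : ∀ t ∈ ts, PySem.Chars.find L t.toList = -1 ∨ st.1 ≤ PySem.Chars.find L t.toList := by
      intro t ht
      rw [hdec] at ht
      rcases List.mem_append.mp ht with ht | ht
      · rcases hpre t ht with h1 | h1
        · exact Or.inl h1
        · exact Or.inr (le_of_lt h1)
      · rcases List.mem_cons.mp ht with rfl | ht
        · exact Or.inr (le_of_eq hfw.symm)
        · exact hpost t ht
    -- no token matches strictly before m
    have hnone : ∀ j < m, ∀ t ∈ ts, pvQ L j t = false := by
      intro j hj t ht
      cases h : pvQ L j t
      · rfl
      · exfalso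
        have hle := pvFind_le_of_prefix L t j ((pvQ_iff L j t).mp h)
        rcases hall t ht with h1 | h1
        · exact hle.2 h1
        · omega
    -- the winner matches at m
    have hwin : pvQ L m st.2 = true := by
      have hspec := PySem.Chars.find_spec (show (0:Int) ≤ PySem.Chars.find L st.2.toList by rw [hfw]; exact hpos)
      rw [pvQ_iff]
      have : (PySem.Chars.find L st.2.toList).toNat = m := by rw [hfw]
      rw [← this]
      exact hspec.1
    -- tokens before the winner do not match at m
    have hprem : ∀ t ∈ pre, pvQ L m t = false := by
      intro t ht
      cases h : pvQ L m t
      · rfl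
      · exfalso
        have hle := pvFind_le_of_prefix L t m ((pvQ_iff L m t).mp h)
        rcases hpre t ht with h1 | h1
        · exact hle.2 h1
        · omega
    have hfind : ts.find? (pvQ L m) = some st.2 := by
      rw [hdec, List.find?_append]
      rw [List.find?_eq_none.mpr (fun t ht => by simp [hprem t ht])]
      simp [hwin]
    -- m is within the scanned range
    have hmlen : m ≤ L.length := by
      have := PySem.Chars.find_le_length L st.2.toList
      omega
    rw [pvScan_hit text lowered ts m st.2 hfind hnone (L.length + 1) 0 (by omega) (by omega)]
    rw [hm1]
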